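-- pv_equiv track=rewrite | github.com/IndyD/data-science-tools | autoEDA/autoEDA.py | _get_best_col_pairs
-- ===== SOURCE A (Python) =====
-- import itertools
--
-- def _get_best_col_pairs(ranked_cols, max_plots):
--     """ Find top n pairs of columns in ranked_cols list (n=max_plots)"""
--     # n is how many columns are needed to satisfy the pairs criteria
--     n=2; m=1;
--     while m < max_plots:
--         m += n
--         n += 1
--
--     # if the number of columns is less than n, use them all
--     if len(ranked_cols) <= n: n = len(ranked_cols)
--     plot_cols = ranked_cols[0:n]
--     weakest_col = plot_cols[n-1]
--
--     # get all possible pairs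
--     col_pairs = list(itertools.combinations(plot_cols, 2))
--     # remove the excess using the weakest column (the nth column)
--     while len(col_pairs) > max_plots:
--         i = 0
--         for col_pair in col_pairs:
--             if col_pair[0] == weakest_col or col_pair[1] == weakest_col:
--                 break
--             i += 1
--         col_pairs.pop(i)
--
--     return col_pairs
-- ===== SOURCE B (Python) =====
-- import itertools
--
-- def _get_best_col_pairs(ranked_cols, max_plots):
--     """Top pairs of columns; removes the excess in a single pass instead of
--     repeated scan-and-pop."""
--     # smallest n >= 2 with n*(n-1)/2 >= max_plots
--     n = 2
--     while n * n - n < 2 * max_plots: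
--         n += 1
--     if len(ranked_cols) <= n:
--         n = len(ranked_cols)
--     plot_cols = ranked_cols[0:n]
--     weakest_col = plot_cols[-1]
--     col_pairs = list(itertools.combinations(plot_cols, 2))
--     # skip the first `excess` pairs containing the weakest column, keep the rest
--     excess = len(col_pairs) - max_plots
--     result = []
--     for pair in col_pairs:
--         if excess > 0 and weakest_col in pair:
--             excess -= 1
--         else:
--             result.append(pair)
--     return result
-- ===== Notes on version B (the rewrite author's own statement) =====
-- stated objective: alternative
-- what changed: A removes excess pairs by repeatedly rescanning the pair list from the start and popping one matching pair per while-iteration; B computes the excess count once and skips the first `excess` pairs containing the weakest column in a single pass (and finds n by a one-variable arithmetic loop instead of A's two-variable loop).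
import Mathlib
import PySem

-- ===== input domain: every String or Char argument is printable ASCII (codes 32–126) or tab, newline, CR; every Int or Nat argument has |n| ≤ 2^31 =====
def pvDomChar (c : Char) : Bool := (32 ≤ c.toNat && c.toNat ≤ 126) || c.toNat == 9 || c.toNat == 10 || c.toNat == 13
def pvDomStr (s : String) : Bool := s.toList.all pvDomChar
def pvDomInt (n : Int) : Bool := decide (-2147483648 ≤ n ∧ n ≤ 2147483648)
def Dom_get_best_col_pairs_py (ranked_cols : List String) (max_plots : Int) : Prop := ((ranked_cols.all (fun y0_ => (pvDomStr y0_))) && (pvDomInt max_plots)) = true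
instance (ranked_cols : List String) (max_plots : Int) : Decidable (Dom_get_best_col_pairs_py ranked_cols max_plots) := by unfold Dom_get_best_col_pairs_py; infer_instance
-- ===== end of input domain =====

-- B replaces A's repeated scan-and-pop removal of excess pairs by a single pass
-- that skips the first `excess` pairs containing the weakest column (objective: alternative).

-- ===== PORT A =====
-- port of itertools.combinations(plot_cols, 2) (used by both Pythons)
def pvCombs2 : List String → List (String × String)
  | [] => []
  | x :: xs => (xs.map (fun y => (x, y))) ++ pvCombs2 xs

-- A's 'while m < max_plots: m += n; n += 1' loop
def pvNmLoop (max_plots n m : Int) (hn : 0 < n) : Int :=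
  if m < max_plots then pvNmLoop max_plots (n + 1) (m + n) (by omega) else n
termination_by (max_plots - m).toNat
decreasing_by omega

-- A's 'while len(col_pairs) > max_plots: … col_pairs.pop(i)' loop;
-- the inner for/break computing i is List.findIdx (i = length when no break, as in Python);
-- Python raises IndexError on pop(len); there the port returns ps (Pre_ excludes those inputs)
def pvRemoveLoop (weakest : String) (max_plots : Int) (ps : List (String × String)) : List (String × String) :=
  if (ps.length : Int) > max_plots then
    match h : PySem.List.pop? ps ((ps.findIdx (fun p => p.1 == weakest || p.2 == weakest) : Nat) : Int) with
    | some r => pvRemoveLoop weakest max_plots r.2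
    | none => ps
  else ps
termination_by ps.length
decreasing_by
  have := PySem.List.length_of_pop?_eq_some ps h
  omega

def get_best_col_pairs_py (ranked_cols : List String) (max_plots : Int) : List (String × String) :=
  let n := pvNmLoop max_plots 2 1 (by norm_num)
  let n := if (ranked_cols.length : Int) ≤ n then (ranked_cols.length : Int) else n
  let plot_cols := PySem.List.slice ranked_cols (some 0) (some n)
  let weakest_col := PySem.List.pyGetD plot_cols (n - 1) ""   -- plot_cols[n-1]; IndexError excluded by Pre_
  pvRemoveLoop weakest_col max_plots (pvCombs2 plot_cols)

-- ===== PORT B =====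
-- B's 'while n*n - n < 2*max_plots: n += 1' loop
def pvNLoop (max_plots n : Int) (hn : 2 ≤ n) : Int :=
  if n * n - n < 2 * max_plots then pvNLoop max_plots (n + 1) (by omega) else n
termination_by (2 * max_plots - (n * n - n)).toNat
decreasing_by
  have h4 : (n + 1) * (n + 1) - (n + 1) = n * n + n := by ring
  omega

-- B's single for-loop: skip the first `excess` pairs containing the weakest column
def pvOnePass (w : String) (excess : Int) : List (String × String) → List (String × String)
  | [] => []
  | p :: rest =>
    if excess > 0 && (w == p.1 || w == p.2) then pvOnePass w (excess - 1) rest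
    else p :: pvOnePass w excess rest

def get_best_col_pairs_py_alt (ranked_cols : List String) (max_plots : Int) : List (String × String) :=
  let n := pvNLoop max_plots 2 (by norm_num)
  let n := if (ranked_cols.length : Int) ≤ n then (ranked_cols.length : Int) else n
  let plot_cols := PySem.List.slice ranked_cols (some 0) (some n)
  let weakest_col := PySem.List.pyGetD plot_cols (-1) ""   -- plot_cols[-1]; IndexError excluded by Pre_
  let col_pairs := pvCombs2 plot_cols
  pvOnePass weakest_col ((col_pairs.length : Int) - max_plots) col_pairs

-- ===== PRECONDITION & SPEC =====
-- Pre_ excludes exactly the inputs where A raises IndexError: the empty list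
-- (plot_cols[n-1] on an empty slice) and negative max_plots (pop on an emptied list).
def Pre_get_best_col_pairs_py (ranked_cols : List String) (max_plots : Int) : Prop :=
  ranked_cols ≠ [] ∧ 0 ≤ max_plots
instance (ranked_cols : List String) (max_plots : Int) : Decidable (Pre_get_best_col_pairs_py ranked_cols max_plots) := by unfold Pre_get_best_col_pairs_py; infer_instance
def pvWitness_get_best_col_pairs_py : List String × Int := (["a", "b", "c"], 2)

def Spec_get_best_col_pairs_py (ranked_cols : List String) (max_plots : Int) (out : List (String × String)) : Prop := out = get_best_col_pairs_py_alt ranked_cols max_plots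
instance (ranked_cols : List String) (max_plots : Int) (out : List (String × String)) : Decidable (Spec_get_best_col_pairs_py ranked_cols max_plots out) := by unfold Spec_get_best_col_pairs_py; infer_instance

-- ===== CLAIM (what is proved, stated in full; the proofs are below) =====
def Claim_equal_get_best_col_pairs_py : Prop := ∀ (ranked_cols : List String) (max_plots : Int), Dom_get_best_col_pairs_py ranked_cols max_plots → Pre_get_best_col_pairs_py ranked_cols max_plots → Spec_get_best_col_pairs_py ranked_cols max_plots (get_best_col_pairs_py ranked_cols max_plots)

-- ===== LEMMAS AND PROOFS =====

-- the two n-computing loops agree under the invariant 2*m = n*n - n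
theorem pv_loop_eq (max_plots : Int) : ∀ (k : Nat) (n m : Int) (hn : 0 < n) (h2 : 2 ≤ n),
    (max_plots - m).toNat = k → 2 * m = n * n - n →
    pvNmLoop max_plots n m hn = pvNLoop max_plots n h2 := by
  intro k
  induction k using Nat.strong_induction_on with
  | _ k ih =>
    intro n m hn h2 hk hinv
    rw [pvNmLoop.eq_def, pvNLoop.eq_def]
    by_cases h : m < max_plots
    · have hc : n * n - n < 2 * max_plots := by omega
      simp only [if_pos h, if_pos hc]
      have hr : (n + 1) * (n + 1) - (n + 1) = n * n + n := by ring
      exact ih (max_plots - (m + n)).toNat (by omega) (n + 1) (m + n) (by omega) (by omega)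
        rfl (by omega)
    · have hc : ¬ (n * n - n < 2 * max_plots) := by omega
      simp only [if_neg h, if_neg hc]

-- properties of B's loop result
theorem pv_nloop_bound (max_plots : Int) :
    ∀ (k : Nat) (n : Int) (h2 : 2 ≤ n), (2 * max_plots - (n * n - n)).toNat = k →
    (n - 1) * (n - 2) ≤ 2 * max_plots →
    n ≤ pvNLoop max_plots n h2 ∧
    (pvNLoop max_plots n h2 - 1) * (pvNLoop max_plots n h2 - 2) ≤ 2 * max_plots := by
  intro k
  induction k using Nat.strong_induction_on with
  | _ k ih =>
    intro n h2 hk hinv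
    rw [pvNLoop.eq_def]
    by_cases hc : n * n - n < 2 * max_plots
    · simp only [if_pos hc]
      have hr : (n + 1) * (n + 1) - (n + 1) = n * n + n := by ring
      have hinv' : ((n + 1) - 1) * ((n + 1) - 2) ≤ 2 * max_plots := by
        have : ((n + 1) - 1) * ((n + 1) - 2) = n * n - n := by ring
        omega
      have := ih (2 * max_plots - ((n + 1) * (n + 1) - (n + 1))).toNat (by omega)
        (n + 1) (by omega) rfl hinv'
      exact ⟨by omega, this.2⟩
    · simp only [if_neg hc]
      exact ⟨le_refl n, hinv⟩

theorem pv_combs2_length (l : List String) :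
    2 * (pvCombs2 l).length + l.length = l.length * l.length := by
  induction l with
  | nil => rfl
  | cons x xs ih =>
    simp only [pvCombs2, List.length_append, List.length_map, List.length_cons]
    have hr : (xs.length + 1) * (xs.length + 1) = xs.length * xs.length + 2 * xs.length + 1 := by
      ring
    omega

theorem pv_combs2_count (l : List String) (hl : l ≠ []) :
    l.length - 1 ≤ (pvCombs2 l).countP (fun p => p.1 == l.getLast hl || p.2 == l.getLast hl) := by
  induction l with
  | nil => exact absurd rfl hl
  | cons x xs ih =>
    by_cases hxs : xs = []
    · subst hxs; simp [pvCombs2]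
    · have hlast : (x :: xs).getLast hl = xs.getLast hxs := List.getLast_cons hxs
      rw [hlast]
      simp only [pvCombs2, List.countP_append, List.countP_map, List.length_cons]
      have h1 : 1 ≤ xs.countP ((fun p => p.1 == xs.getLast hxs || p.2 == xs.getLast hxs) ∘
          fun y => (x, y)) := by
        refine List.countP_pos_iff.mpr ⟨xs.getLast hxs, List.getLast_mem hxs, ?_⟩
        simp
      have h2 := ih hxs
      omega

theorem pv_onePass_nonpos (w : String) (e : Int) (he : e ≤ 0) (ps : List (String × String)) :
    pvOnePass w e ps = ps := by
  induction ps with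
  | nil => rfl
  | cons p rest ih =>
    have : ¬ (e > 0) := by omega
    simp [pvOnePass, this, ih]

theorem pv_beq_swap (a b : String) : (a == b) = (b == a) := by
  by_cases h : a = b
  · subst h; rfl
  · simp [h, Ne.symm h]

-- one step: skipping one match equals erasing the first match
theorem pv_onePass_erase (w : String) (e : Int) (he : 0 < e) : ∀ (ps : List (String × String)),
    (∃ p ∈ ps, (p.1 == w || p.2 == w) = true) →
    pvOnePass w e ps
      = pvOnePass w (e - 1) (ps.eraseIdx (ps.findIdx (fun p => p.1 == w || p.2 == w))) := by
  intro ps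
  induction ps with
  | nil => intro hex; simp at hex
  | cons p rest ih =>
    intro hex
    rw [List.findIdx_cons]
    by_cases hp : (p.1 == w || p.2 == w) = true
    · simp only [hp, cond_true, List.eraseIdx_cons_zero]
      have hsw : (w == p.1 || w == p.2) = true := by
        rw [pv_beq_swap w p.1, pv_beq_swap w p.2]; exact hp
      simp [pvOnePass, hsw, he]
    · have hsw : (w == p.1 || w == p.2) = false := by
        rw [pv_beq_swap w p.1, pv_beq_swap w p.2]; simpa using hp
      have hex' : ∃ q ∈ rest, (q.1 == w || q.2 == w) = true := by
        obtain ⟨q, hq, hqp⟩ := hex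
        rcases List.mem_cons.mp hq with rfl | hq'
        · exact absurd hqp hp
        · exact ⟨q, hq', hqp⟩
      simp only [hp, cond_false, List.eraseIdx_cons_succ]
      simp [pvOnePass, hsw, ih hex']

theorem pv_count_erase (w : String) : ∀ (ps : List (String × String)),
    (∃ p ∈ ps, (p.1 == w || p.2 == w) = true) →
    (ps.eraseIdx (ps.findIdx (fun p => p.1 == w || p.2 == w))).countP
        (fun p => p.1 == w || p.2 == w) + 1
      = ps.countP (fun p => p.1 == w || p.2 == w) := by
  intro ps
  induction ps with
  | nil => intro hex; simp at hex
  | cons p rest ih =>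
    intro hex
    rw [List.findIdx_cons]
    by_cases hp : (p.1 == w || p.2 == w) = true
    · simp [hp]
    · have hex' : ∃ q ∈ rest, (q.1 == w || q.2 == w) = true := by
        obtain ⟨q, hq, hqp⟩ := hex
        rcases List.mem_cons.mp hq with rfl | hq'
        · exact absurd hqp hp
        · exact ⟨q, hq', hqp⟩
      simp only [hp, cond_false, List.eraseIdx_cons_succ]
      simp only [List.countP_cons, hp]
      have := ih hex'
      simp only [Bool.false_eq_true, if_false] at *
      omega

theorem pv_remove_eq_onePass (w : String) (mp : Int) : ∀ (k : Nat) (ps : List (String × String)),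
    ps.length = k →
    (ps.length : Int) - mp ≤ (ps.countP (fun p => p.1 == w || p.2 == w) : Int) →
    pvRemoveLoop w mp ps = pvOnePass w ((ps.length : Int) - mp) ps := by
  intro k
  induction k using Nat.strong_induction_on with
  | _ k ih =>
    intro ps hk hcnt
    rw [pvRemoveLoop.eq_def]
    by_cases hgt : (ps.length : Int) > mp
    · simp only [if_pos hgt]
      have hcpos : 0 < ps.countP (fun p => p.1 == w || p.2 == w) := by omega
      obtain ⟨q, hq, hqp⟩ := List.countP_pos_iff.mp hcpos
      have hidx : ps.findIdx (fun p => p.1 == w || p.2 == w) < ps.length :=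
        List.findIdx_lt_length.mpr ⟨q, hq, hqp⟩
      rw [PySem.List.pop?_natCast ps _ hidx]
      show pvRemoveLoop w mp (ps.eraseIdx (ps.findIdx (fun p => p.1 == w || p.2 == w)))
        = pvOnePass w ((ps.length : Int) - mp) ps
      have hlen' := List.length_eraseIdx_of_lt hidx
      have hcnt' := pv_count_erase w ps ⟨q, hq, hqp⟩
      have := ih (ps.length - 1) (by omega)
        (ps.eraseIdx (ps.findIdx (fun p => p.1 == w || p.2 == w))) (by omega) (by
          push_cast [hlen']
          omega)
      rw [this]
      rw [pv_onePass_erase w _ (by omega) ps ⟨q, hq, hqp⟩]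
      congr 1
      push_cast [hlen']
      omega
    · simp only [if_neg hgt]
      rw [pv_onePass_nonpos w _ (by omega)]

-- the bodies after the n-loop agree, for any r with the loop's exit properties
theorem pv_main (rc : List String) (mp r n : Int) (hne : rc ≠ [])
    (h2 : 2 ≤ r) (hb : (r - 1) * (r - 2) ≤ 2 * mp)
    (hn : n = if (rc.length : Int) ≤ r then (rc.length : Int) else r) :
    pvRemoveLoop (PySem.List.pyGetD (PySem.List.slice rc (some 0) (some n)) (n - 1) "") mp
        (pvCombs2 (PySem.List.slice rc (some 0) (some n)))
      = pvOnePass (PySem.List.pyGetD (PySem.List.slice rc (some 0) (some n)) (-1) "")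
          (((pvCombs2 (PySem.List.slice rc (some 0) (some n))).length : Int) - mp)
          (pvCombs2 (PySem.List.slice rc (some 0) (some n))) := by
  have hlen1 : rc.length ≠ 0 := by simpa using hne
  have hn1 : 1 ≤ n := by rw [hn]; split <;> omega
  have hnr : n ≤ r := by rw [hn]; split <;> omega
  have hnlen : n ≤ (rc.length : Int) := by rw [hn]; split <;> omega
  have hplot : PySem.List.slice rc (some 0) (some n) = rc.take n.toNat := by
    rw [PySem.List.slice_zero_start, PySem.List.slice_to rc (by omega)]
  rw [hplot]
  have hplen : (rc.take n.toNat).length = n.toNat := by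
    simp only [List.length_take]
    omega
  have hpne : rc.take n.toNat ≠ [] := by
    apply List.ne_nil_of_length_pos
    omega
  have hw1 : PySem.List.pyGetD (rc.take n.toNat) (n - 1) "" = (rc.take n.toNat).getLast hpne := by
    rw [PySem.List.pyGetD_eq_getElem _ _ (by omega) (by rw [hplen]; omega)]
    rw [List.getLast_eq_getElem]
    congr 1
    omega
  have hw2 : PySem.List.pyGetD (rc.take n.toNat) (-1) ""
      = (rc.take n.toNat).getLast hpne := PySem.List.pyGetD_neg_one _ _ hpne
  rw [hw1, hw2]
  apply pv_remove_eq_onePass _ mp (pvCombs2 (rc.take n.toNat)).length _ rfl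
  -- the excess never exceeds the number of pairs containing the weakest column
  have hc := pv_combs2_count (rc.take n.toNat) hpne
  have hL := pv_combs2_length (rc.take n.toNat)
  have hmono : (n - 1) * (n - 2) ≤ (r - 1) * (r - 2) := by
    nlinarith [mul_nonneg (by omega : (0:Int) ≤ r - n) (by omega : (0:Int) ≤ r + n - 3)]
  have hsq : (n - 1) * (n - 2) = n * n - 3 * n + 2 := by ring
  have hLi := congrArg (Nat.cast (R := Int)) hL
  push_cast at hLi
  rw [hplen] at hLi hc
  have hcast : ((n.toNat : Int)) = n := by omega
  rw [hcast] at hLi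
  -- hLi : 2 * L + n = n * n ; hc : n.toNat - 1 ≤ countP ; goal : L - mp ≤ countP
  omega

-- ===== VERDICT (by name: the statement is the Claim_ definition above) =====
theorem get_best_col_pairs_py_spec : Claim_equal_get_best_col_pairs_py := by
  intro rc mp _ hpre
  obtain ⟨hne, hmp⟩ := hpre
  show get_best_col_pairs_py rc mp = get_best_col_pairs_py_alt rc mp
  simp only [get_best_col_pairs_py, get_best_col_pairs_py_alt]
  rw [pv_loop_eq mp (mp - 1).toNat 2 1 (by norm_num) (by norm_num) rfl (by norm_num)]
  have hbnd := pv_nloop_bound mp _ 2 (by norm_num) rfl (by norm_num; omega)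
  exact pv_main rc mp _ _ hne hbnd.1 hbnd.2 rfl
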